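-- pv_equiv track=rewrite | github.com/pbelskiy/contest | leetcode.com/3912_valid_elements_in_an_array/solution.py | findValidElements
-- ===== SOURCE A (Python) =====
-- def findValidElements(nums: list[int]) -> list[int]:
--     a = [nums[0]]
--
--     for i in range(1, len(nums) - 1):
--         if max(nums[:i]) < nums[i] or nums[i] > max(nums[i + 1:]):
--             a.append(nums[i])
--
--     if len(nums) > 1:
--         a.append(nums[-1])
--
--     return a
-- ===== SOURCE B (Python) =====
-- def findValidElements(nums: list[int]) -> list[int]:
--     # suffix maxima: suf[i] = max(nums[i:]), built right-to-left in one pass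
--     suf = []
--     m = None
--     for x in reversed(nums):
--         m = x if m is None else max(m, x)
--         suf.append(m)
--     suf.reverse()
--
--     res = [nums[0]]
--     pm = nums[0]
--     for i in range(1, len(nums) - 1):
--         x = nums[i]
--         if x > pm or x > suf[i + 1]:
--             res.append(x)
--         pm = max(pm, x)
--
--     if len(nums) > 1:
--         res.append(nums[-1])
--     return res
-- ===== Notes on version B (the rewrite author's own statement) =====
-- stated objective: faster
-- what changed: Replaced the per-index max(nums[:i]) / max(nums[i+1:]) rescans with a precomputed suffix-maxima array plus a running prefix maximum, turning the quadratic scan into two linear passes.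
import Mathlib
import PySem

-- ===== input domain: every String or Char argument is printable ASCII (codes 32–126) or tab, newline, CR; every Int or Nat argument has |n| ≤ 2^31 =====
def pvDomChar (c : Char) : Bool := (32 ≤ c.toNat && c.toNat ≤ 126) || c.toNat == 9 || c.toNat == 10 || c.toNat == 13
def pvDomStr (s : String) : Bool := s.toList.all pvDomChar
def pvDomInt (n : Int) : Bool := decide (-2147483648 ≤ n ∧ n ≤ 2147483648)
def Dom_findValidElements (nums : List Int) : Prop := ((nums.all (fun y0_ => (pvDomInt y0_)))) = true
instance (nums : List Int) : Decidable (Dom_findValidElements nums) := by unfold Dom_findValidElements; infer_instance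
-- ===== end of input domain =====

-- B replaces A's quadratic max(nums[:i]) / max(nums[i+1:]) rescans by a precomputed
-- suffix-maxima array plus a running prefix maximum (two linear passes); measurably faster.

-- ===== PORT A =====
def findValidElements (nums : List Int) : List Int :=
  let a : List Int := [PySem.List.pyGetD nums 0 0]
  let a := (PySem.List.pyRange 1 ((nums.length : Int) - 1) 1).foldl
    (fun acc i =>
      if (PySem.List.max? (PySem.List.slice nums (some 0) (some i)) (fun y => y)).getD 0
            < PySem.List.pyGetD nums i 0
         ∨ PySem.List.pyGetD nums i 0
            > (PySem.List.max? (PySem.List.slice nums (some (i + 1)) none) (fun y => y)).getD 0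
      then acc ++ [PySem.List.pyGetD nums i 0] else acc) a
  if (nums.length : Int) > 1 then a ++ [PySem.List.pyGetD nums (-1) 0] else a

-- ===== PORT B =====
def findValidElements_alt (nums : List Int) : List Int :=
  -- for x in reversed(nums): m = x if m is None else max(m, x); suf.append(m)
  let st := nums.reverse.foldl
    (fun (st : Option Int × List Int) x =>
      let m := match st.1 with
        | none => x
        | some m0 => max m0 x
      (some m, st.2 ++ [m])) ((none : Option Int), ([] : List Int))
  let suf := st.2.reverse
  let st2 := (PySem.List.pyRange 1 ((nums.length : Int) - 1) 1).foldl
    (fun (st : List Int × Int) i =>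
      let x := PySem.List.pyGetD nums i 0
      (if x > st.2 ∨ x > PySem.List.pyGetD suf (i + 1) 0 then st.1 ++ [x] else st.1,
       max st.2 x))
    ([PySem.List.pyGetD nums 0 0], PySem.List.pyGetD nums 0 0)
  if (nums.length : Int) > 1 then st2.1 ++ [PySem.List.pyGetD nums (-1) 0] else st2.1

-- ===== PRECONDITION & SPEC =====
-- Pre_ excludes only the empty list, on which A (nums[0]) raises IndexError (B raises there too).
def Pre_findValidElements (nums : List Int) : Prop := nums ≠ []
instance (nums : List Int) : Decidable (Pre_findValidElements nums) := by unfold Pre_findValidElements; infer_instance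
def pvWitness_findValidElements : List Int := [3, 1, 2]

def Spec_findValidElements (nums : List Int) (out : List Int) : Prop := out = findValidElements_alt nums
instance (nums : List Int) (out : List Int) : Decidable (Spec_findValidElements nums out) := by unfold Spec_findValidElements; infer_instance

-- ===== CLAIM (what is proved, stated in full; the proofs are below) =====
def Claim_equal_findValidElements : Prop := ∀ (nums : List Int), Dom_findValidElements nums → Pre_findValidElements nums → Spec_findValidElements nums (findValidElements nums)

-- ===== LEMMAS AND PROOFS =====

-- max of a nonempty list as A's max(...) computes it
def pmax : List Int → Int
  | [] => 0
  | x :: t => t.foldl max x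

-- suffix maxima: sufList l = [pmax (l.drop 0), pmax (l.drop 1), …]
def sufList : List Int → List Int
  | [] => []
  | x :: t => pmax (x :: t) :: sufList t

theorem pmax_cons_ne (x : Int) (t : List Int) (h : t ≠ []) : pmax (x :: t) = max x (pmax t) := by
  cases t with
  | nil => exact absurd rfl h
  | cons c t' => simp [pmax, List.foldl_assoc]

theorem pmax_append_singleton (l : List Int) (x : Int) (h : l ≠ []) :
    pmax (l ++ [x]) = max (pmax l) x := by
  cases l with
  | nil => exact absurd rfl h
  | cons y t => simp [pmax, List.foldl_append]

theorem sufList_length (l : List Int) : (sufList l).length = l.length := by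
  induction l with
  | nil => rfl
  | cons x t ih => simp [sufList, ih]

theorem sufList_getD (l : List Int) (j : Nat) (h : j < l.length) :
    (sufList l).getD j 0 = pmax (l.drop j) := by
  induction l generalizing j with
  | nil => simp at h
  | cons x t ih =>
    cases j with
    | zero => simp [sufList]
    | succ j' =>
      simp only [sufList, List.getD_cons_succ, List.drop_succ_cons]
      exact ih j' (by simpa using h)

-- B's first loop computes (max of all, running suffix maxima in reverse order)
theorem suffold_spec (l : List Int) :
    l.reverse.foldl
      (fun (st : Option Int × List Int) x =>
        let m := match st.1 with
          | none => x
          | some m0 => max m0 x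
        (some m, st.2 ++ [m])) ((none : Option Int), ([] : List Int))
    = ((if l = [] then none else some (pmax l)), (sufList l).reverse) := by
  induction l with
  | nil => rfl
  | cons x t ih =>
    rw [List.reverse_cons, List.foldl_append, ih]
    by_cases ht : t = []
    · subst ht; rfl
    · simp only [if_neg ht, List.foldl_cons, List.foldl_nil, if_neg (by simp : x :: t ≠ [])]
      rw [max_comm, ← pmax_cons_ne x t ht]
      simp [sufList]

theorem max?_getD_pmax (l : List Int) (h : l ≠ []) :
    (PySem.List.max? l (fun y => y)).getD 0 = pmax l := by
  cases l with
  | nil => exact absurd rfl h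
  | cons x t => rw [PySem.List.max?_id_cons]; rfl

-- the central loop equivalence: A's per-step slice maxima = B's running prefix max + suffix table
theorem loop_eq (nums : List Int) :
    ∀ (k : Nat) (j : Int) (acc : List Int), 1 ≤ j →
      (((nums.length : Int) - 1) - j).toNat = k →
      (PySem.List.pyRange j ((nums.length : Int) - 1) 1).foldl
        (fun acc i =>
          if (PySem.List.max? (PySem.List.slice nums (some 0) (some i)) (fun y => y)).getD 0
                < PySem.List.pyGetD nums i 0
             ∨ PySem.List.pyGetD nums i 0
                > (PySem.List.max? (PySem.List.slice nums (some (i + 1)) none) (fun y => y)).getD 0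
          then acc ++ [PySem.List.pyGetD nums i 0] else acc) acc
      = ((PySem.List.pyRange j ((nums.length : Int) - 1) 1).foldl
          (fun (st : List Int × Int) i =>
            let x := PySem.List.pyGetD nums i 0
            (if x > st.2 ∨ x > PySem.List.pyGetD (sufList nums) (i + 1) 0 then st.1 ++ [x] else st.1,
             max st.2 x)) (acc, pmax (nums.take j.toNat))).1 := by
  intro k
  induction k with
  | zero =>
    intro j acc hj hk
    have hle : (nums.length : Int) - 1 ≤ j := by omega
    rw [PySem.List.pyRange_one_eq_nil hle]
    rfl
  | succ k ih =>
    intro j acc hj hk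
    have hlt : j < (nums.length : Int) - 1 := by omega
    have hjn : j < (nums.length : Int) := by omega
    have hj0 : (0:Int) ≤ j := by omega
    rw [PySem.List.pyRange_one_cons hlt]
    simp only [List.foldl_cons]
    -- facts about index j
    have hx : PySem.List.pyGetD nums j 0 = nums[j.toNat]'(by omega) :=
      PySem.List.pyGetD_eq_getElem nums 0 hj0 hjn
    have htake : PySem.List.slice nums (some 0) (some j) = nums.take j.toNat := by
      rw [PySem.List.slice_zero_start, PySem.List.slice_to nums hj0]
    have htakene : nums.take j.toNat ≠ [] := by
      intro h
      rw [List.take_eq_nil_iff] at h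
      rcases h with h | h
      · omega
      · subst h; simp at hjn; omega
    have hdrop : PySem.List.slice nums (some (j + 1)) none = nums.drop (j + 1).toNat :=
      PySem.List.slice_from nums (by omega)
    have hdropne : nums.drop (j + 1).toNat ≠ [] := by
      simp [List.drop_eq_nil_iff]; omega
    have hsuf : PySem.List.pyGetD (sufList nums) (j + 1) 0 = pmax (nums.drop (j + 1).toNat) := by
      rw [PySem.List.pyGetD_eq_getElem (sufList nums) 0 (by omega)
        (by rw [sufList_length]; omega)]
      rw [← sufList_getD nums (j+1).toNat (by omega)]
      rw [List.getD_eq_getElem _ _ (by rw [sufList_length]; omega)]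
    -- the two step results agree
    have hnewpm : max (pmax (nums.take j.toNat)) (PySem.List.pyGetD nums j 0)
        = pmax (nums.take (j + 1).toNat) := by
      have h1 : (j + 1).toNat = j.toNat + 1 := by omega
      have h2 : nums.take (j.toNat + 1) = nums.take j.toNat ++ [nums[j.toNat]'(by omega)] := by
        rw [List.take_add_one, List.getElem?_eq_getElem (by omega)]
        rfl
      rw [h1, h2, hx, pmax_append_singleton _ _ htakene]
    have hcond :
        ((PySem.List.max? (PySem.List.slice nums (some 0) (some j)) (fun y => y)).getD 0
            < PySem.List.pyGetD nums j 0
         ∨ PySem.List.pyGetD nums j 0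
            > (PySem.List.max? (PySem.List.slice nums (some (j + 1)) none) (fun y => y)).getD 0)
        ↔ (PySem.List.pyGetD nums j 0 > pmax (nums.take j.toNat)
           ∨ PySem.List.pyGetD nums j 0 > PySem.List.pyGetD (sufList nums) (j + 1) 0) := by
      rw [htake, hdrop, hsuf, max?_getD_pmax _ htakene, max?_getD_pmax _ hdropne]
    by_cases hc : PySem.List.pyGetD nums j 0 > pmax (nums.take j.toNat)
        ∨ PySem.List.pyGetD nums j 0 > PySem.List.pyGetD (sufList nums) (j + 1) 0
    · rw [if_pos (hcond.mpr hc), if_pos hc, hnewpm]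
      exact ih (j + 1) (acc ++ [PySem.List.pyGetD nums j 0]) (by omega) (by omega)
    · rw [if_neg (fun h => hc (hcond.mp h)), if_neg hc, hnewpm]
      exact ih (j + 1) acc (by omega) (by omega)

-- ===== VERDICT (by name: the statement is the Claim_ definition above) =====
theorem findValidElements_spec : Claim_equal_findValidElements := by
  intro nums _hdom hpre
  unfold Spec_findValidElements findValidElements findValidElements_alt
  simp only [suffold_spec nums, List.reverse_reverse]
  have h0 : PySem.List.pyGetD nums 0 0 = nums[0]'(by
      cases nums with
      | nil => exact absurd rfl hpre
      | cons a t => simp) := by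
    exact PySem.List.pyGetD_eq_getElem nums 0 (by omega) (by
      cases nums with
      | nil => exact absurd rfl hpre
      | cons a t => simp)
  have hpm1 : pmax (nums.take (1:Int).toNat) = PySem.List.pyGetD nums 0 0 := by
    cases nums with
    | nil => exact absurd rfl hpre
    | cons a t => simp [pmax, h0]
  rw [← hpm1]
  rw [loop_eq nums ((((nums.length : Int) - 1) - 1).toNat) 1 _ le_rfl rfl]
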